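-- pv_equiv track=rewrite | github.com/m-orlewski/advent-of-code | aoc_2024/day_22.py | calculateSecretNumber
-- ===== SOURCE A (Python) =====
-- def mix_and_prune(currentSecretNumber, previousSecretNumber):
--     currentSecretNumber = currentSecretNumber ^ previousSecretNumber
--     currentSecretNumber %= 16777216
--     return currentSecretNumber
--
-- def calculateSecretNumber(secretNumber, N):
--     prev = secretNumber
--     changes = []
--     sequences = {}
--     for _ in range(N):
--         secretNumber = mix_and_prune(secretNumber*64, secretNumber)
--         secretNumber = mix_and_prune(secretNumber//32, secretNumber)
--         secretNumber = mix_and_prune(secretNumber*2048, secretNumber)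
--         changes.append(secretNumber%10 - prev%10)
--         prev = secretNumber
--         if len(changes) > 3:
--             sequence = tuple(changes[-4:])
--             if sequence not in sequences:
--                 sequences[sequence] = secretNumber%10
--
--     return secretNumber, sequences
-- ===== SOURCE B (Python) =====
-- def calculateSecretNumber(secretNumber, N):
--     # Pass 1: materialize the whole chain of secret numbers.
--     s = secretNumber
--     secrets = [s]
--     for _ in range(N):
--         s = ((s * 64) ^ s) % 16777216
--         s = ((s // 32) ^ s) % 16777216
--         s = ((s * 2048) ^ s) % 16777216
--         secrets.append(s)
--     # Pass 2: slide a 4-wide window over the price differences.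
--     prices = [x % 10 for x in secrets]
--     after = prices[1:]
--     diffs = [b - a for a, b in zip(prices, after)]
--     pairs = list(zip(diffs, after))
--     sequences = {}
--     for d1, d2, d3, (d4, p) in zip(diffs, diffs[1:], diffs[2:], pairs[3:]):
--         key = (d1, d2, d3, d4)
--         if key not in sequences:
--             sequences[key] = p
--     return s, sequences
-- ===== Notes on version B (the rewrite author's own statement) =====
-- stated objective: alternative
-- what changed: B replaces A's single interleaved loop (which grows a changes list and slices its last four elements each iteration) by two separated passes: first materialize the whole secret chain, then derive prices/differences and slide a 4-wide window over zipped staggered lists to build the dict.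
import Mathlib
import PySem

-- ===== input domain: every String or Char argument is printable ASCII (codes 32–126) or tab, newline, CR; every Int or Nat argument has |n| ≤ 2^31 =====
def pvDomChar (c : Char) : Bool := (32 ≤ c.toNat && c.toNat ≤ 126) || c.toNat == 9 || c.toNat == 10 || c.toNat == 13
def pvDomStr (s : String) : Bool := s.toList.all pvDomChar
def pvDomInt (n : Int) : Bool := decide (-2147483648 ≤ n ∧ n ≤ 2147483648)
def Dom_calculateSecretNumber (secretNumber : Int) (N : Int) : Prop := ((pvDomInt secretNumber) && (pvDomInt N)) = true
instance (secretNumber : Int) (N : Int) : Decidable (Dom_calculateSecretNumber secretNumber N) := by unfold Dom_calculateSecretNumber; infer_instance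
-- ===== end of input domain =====

-- B separates PRNG generation from window analysis: it materializes the chain of secrets,
-- then slides a 4-wide window over the zipped difference/price lists (objective: alternative).

-- ===== PORT A =====
def mixAndPrune (currentSecretNumber previousSecretNumber : Int) : Int :=
  PySem.Int.mod (PySem.Int.bxor currentSecretNumber previousSecretNumber) 16777216

def aLoop : Nat → Int → Int → List Int → PySem.Dict (List Int) Int →
    Int × PySem.Dict (List Int) Int
  | 0, secretNumber, _, _, sequences => (secretNumber, sequences)
  | n + 1, secretNumber, prev, changes, sequences =>
    let s1 := mixAndPrune (secretNumber * 64) secretNumber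
    let s2 := mixAndPrune (PySem.Int.floordiv s1 32) s1
    let s3 := mixAndPrune (s2 * 2048) s2
    let changes' := changes ++ [PySem.Int.mod s3 10 - PySem.Int.mod prev 10]
    let sequences' :=
      if 3 < changes'.length then
        let sequence := PySem.List.slice changes' (some (-4)) none
        if sequences.contains sequence then sequences
        else sequences.insert sequence (PySem.Int.mod s3 10)
      else sequences
    aLoop n s3 s3 changes' sequences'

def calculateSecretNumber (secretNumber : Int) (N : Int) : Int × (List (List Int × Int)) :=
  let r := aLoop N.toNat secretNumber secretNumber [] PySem.Dict.empty
  (r.1, r.2.items)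

-- ===== PORT B =====
def pbGen : Nat → Int → Int × List Int
  | 0, s => (s, [])
  | n + 1, s =>
    let s1 := PySem.Int.mod (PySem.Int.bxor (s * 64) s) 16777216
    let s2 := PySem.Int.mod (PySem.Int.bxor (PySem.Int.floordiv s1 32) s1) 16777216
    let s3 := PySem.Int.mod (PySem.Int.bxor (s2 * 2048) s2) 16777216
    let r := pbGen n s3
    (r.1, s3 :: r.2)

def pbUpd (sequences : PySem.Dict (List Int) Int) (w : Int × Int × Int × Int × Int) :
    PySem.Dict (List Int) Int :=
  let key := [w.1, w.2.1, w.2.2.1, w.2.2.2.1]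
  if sequences.contains key then sequences else sequences.insert key w.2.2.2.2

def calculateSecretNumber_alt (secretNumber : Int) (N : Int) : Int × (List (List Int × Int)) :=
  let g := pbGen N.toNat secretNumber
  let prices := (secretNumber :: g.2).map (fun x => PySem.Int.mod x 10)
  let after := PySem.List.slice prices (some 1) none
  let diffs := List.zipWith (fun a b => b - a) prices after
  let pairs := List.zip diffs after
  let quads := List.zip diffs (List.zip (PySem.List.slice diffs (some 1) none)
      (List.zip (PySem.List.slice diffs (some 2) none) (PySem.List.slice pairs (some 3) none)))
  (g.1, (quads.foldl pbUpd PySem.Dict.empty).items)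

-- ===== PRECONDITION & SPEC =====
def Spec_calculateSecretNumber (secretNumber : Int) (N : Int) (out : Int × (List (List Int × Int))) : Prop := out = calculateSecretNumber_alt secretNumber N
instance (secretNumber : Int) (N : Int) (out : Int × (List (List Int × Int))) : Decidable (Spec_calculateSecretNumber secretNumber N out) := by unfold Spec_calculateSecretNumber; infer_instance

-- ===== CLAIM (what is proved, stated in full; the proofs are below) =====
def Claim_equal_calculateSecretNumber : Prop := ∀ (secretNumber : Int) (N : Int), Dom_calculateSecretNumber secretNumber N → Spec_calculateSecretNumber secretNumber N (calculateSecretNumber secretNumber N)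

-- ===== LEMMAS AND PROOFS =====

-- one PRNG step (A's three mix_and_prune calls / B's three inline lines are this term)
def pvStep (s : Int) : Int :=
  let s1 := PySem.Int.mod (PySem.Int.bxor (s * 64) s) 16777216
  let s2 := PySem.Int.mod (PySem.Int.bxor (PySem.Int.floordiv s1 32) s1) 16777216
  PySem.Int.mod (PySem.Int.bxor (s2 * 2048) s2) 16777216

def pvLast : Nat → Int → Int
  | 0, s => s
  | n + 1, s => pvLast n (pvStep s)

def pvChain : Nat → Int → List Int
  | 0, _ => []
  | n + 1, s => pvStep s :: pvChain n (pvStep s)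

-- the (difference, price-after) stream
def pvPairs : Nat → Int → List (Int × Int)
  | 0, _ => []
  | n + 1, s =>
    (PySem.Int.mod (pvStep s) 10 - PySem.Int.mod s 10, PySem.Int.mod (pvStep s) 10) ::
      pvPairs n (pvStep s)

-- A's dict logic, extracted: c = changes so far (with the price after each), remaining stream
def pvMid : List (Int × Int) → List (Int × Int) → PySem.Dict (List Int) Int →
    PySem.Dict (List Int) Int
  | _, [], sequences => sequences
  | c, (d, p) :: rest, sequences =>
    let c' := c ++ [(d, p)]
    let sequences' :=
      if 3 < c'.length then
        let sequence := PySem.List.slice (c'.map Prod.fst) (some (-4)) none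
        if sequences.contains sequence then sequences
        else sequences.insert sequence p
      else sequences
    pvMid c' rest sequences'

def pvWindows : List (Int × Int) → List (Int × Int × Int × Int × Int)
  | (d1, _) :: (d2, q2) :: (d3, q3) :: (d4, p) :: rest =>
    (d1, d2, d3, d4, p) :: pvWindows ((d2, q2) :: (d3, q3) :: (d4, p) :: rest)
  | _ => []
termination_by l => l.length

theorem pbGen_eq (n : Nat) : ∀ s, pbGen n s = (pvLast n s, pvChain n s) := by
  induction n with
  | zero => intro s; rfl
  | succ n ih => intro s; simp [pbGen, pvLast, pvChain, pvStep, ih]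

theorem pairs_eq (n : Nat) : ∀ s,
    (let P := (s :: pvChain n s).map (fun x => PySem.Int.mod x 10)
     List.zip (List.zipWith (fun a b => b - a) P (P.drop 1)) (P.drop 1)) = pvPairs n s := by
  induction n with
  | zero => intro s; rfl
  | succ n ih => intro s; simpa [pvChain, pvPairs, List.zipWith] using ih (pvStep s)

theorem windows_short (l : List (Int × Int)) (h : l.length < 4) : pvWindows l = [] := by
  match l with
  | [] => simp [pvWindows]
  | [_] => simp [pvWindows]
  | [_, _] => simp [pvWindows]
  | [_, _, _] => simp [pvWindows]
  | _ :: _ :: _ :: _ :: _ => simp at h; omega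

theorem windows_eq_zip : ∀ (l : List (Int × Int)),
    List.zip (l.map Prod.fst) (List.zip ((l.map Prod.fst).drop 1)
      (List.zip ((l.map Prod.fst).drop 2) (l.drop 3))) = pvWindows l := by
  intro l
  match l with
  | [] => simp [pvWindows]
  | [(a, b)] => simp [pvWindows]
  | [(a, b), (a2, b2)] => simp [pvWindows]
  | [(a, b), (a2, b2), (a3, b3)] => simp [pvWindows]
  | (d1, q1) :: (d2, q2) :: (d3, q3) :: (d4, p) :: rest =>
    have ih := windows_eq_zip ((d2, q2) :: (d3, q3) :: (d4, p) :: rest)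
    simp only [pvWindows, List.map_cons, List.drop_succ_cons, List.drop_zero,
      List.zip_cons_cons] at ih ⊢
    exact congrArg (List.cons _) ih
termination_by l => l.length

theorem mid_eq_windows : ∀ (pairs c : List (Int × Int)) (sequences : PySem.Dict (List Int) Int),
    pvMid c pairs sequences =
      (pvWindows (c.drop (c.length - 3) ++ pairs)).foldl pbUpd sequences := by
  intro pairs
  induction pairs with
  | nil =>
    intro c sequences
    rw [windows_short]
    · rfl
    · simp; omega
  | cons dp rest ih =>
    intro c sequences
    obtain ⟨d, p⟩ := dp
    by_cases h : c.length ≤ 2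
    · have h0 : c.length - 3 = 0 := by omega
      have h1 : (c ++ [(d, p)]).length - 3 = 0 := by simp; omega
      have hseq : ¬ 3 < (c ++ [(d, p)]).length := by simp; omega
      simp only [pvMid, hseq, if_false]
      rw [ih (c ++ [(d, p)])]
      rw [h0, h1]
      simp
    · -- 3 ≤ c.length : the window fires
      have h3 : 3 ≤ c.length := by omega
      have hlen : (c.drop (c.length - 3)).length = 3 := by simp; omega
      obtain ⟨a, b, e, hpc⟩ : ∃ a b e, c.drop (c.length - 3) = [a, b, e] := by
        match hx : c.drop (c.length - 3) with
        | [a, b, e] => exact ⟨a, b, e, rfl⟩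
        | [] | [_] | [_, _] | _ :: _ :: _ :: _ :: _ => rw [hx] at hlen; simp at hlen; try omega
      have hfire : 3 < (c ++ [(d, p)]).length := by simp; omega
      have hslice : PySem.List.slice ((c ++ [(d, p)]).map Prod.fst) (some (-4)) none
          = [a.1, b.1, e.1, d] := by
        rw [PySem.List.slice_from_neg_ofNat _ 4 (by omega)]
        have hlm : ((c ++ [(d, p)]).map Prod.fst).length - 4 = c.length - 3 := by simp
        rw [hlm, List.map_append, List.drop_append_of_le_length (by simp)]
        rw [← List.map_drop, hpc]
        simp
      have htl : c.drop (c.length - 2) = [b, e] := by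
        have htd := congrArg List.tail hpc
        rw [List.tail_drop] at htd
        have e3 : c.length - 3 + 1 = c.length - 2 := by omega
        rw [e3] at htd
        simpa using htd
      have hpad' : (c ++ [(d, p)]).drop ((c ++ [(d, p)]).length - 3) = [b, e, (d, p)] := by
        have hl : (c ++ [(d, p)]).length - 3 = c.length - 2 := by simp
        rw [hl, List.drop_append_of_le_length (by omega), htl]; rfl
      have hpad : c.drop (c.length - 3) ++ (d, p) :: rest
          = a :: b :: e :: (d, p) :: rest := by rw [hpc]; rfl
      simp only [pvMid, hfire, if_true, hslice]
      rw [ih (c ++ [(d, p)]), hpad', hpad]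
      obtain ⟨a1, a2⟩ := a; obtain ⟨b1, b2⟩ := b; obtain ⟨e1, e2⟩ := e
      simp [pvWindows, pbUpd]

theorem aLoop_succ (n : Nat) (s prev : Int) (changes : List Int)
    (sequences : PySem.Dict (List Int) Int) :
    aLoop (n + 1) s prev changes sequences =
      aLoop n (pvStep s) (pvStep s)
        (changes ++ [PySem.Int.mod (pvStep s) 10 - PySem.Int.mod prev 10])
        (if 3 < (changes ++ [PySem.Int.mod (pvStep s) 10 - PySem.Int.mod prev 10]).length then
          (if sequences.contains (PySem.List.slice
              (changes ++ [PySem.Int.mod (pvStep s) 10 - PySem.Int.mod prev 10]) (some (-4)) none)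
            then sequences
            else sequences.insert (PySem.List.slice
              (changes ++ [PySem.Int.mod (pvStep s) 10 - PySem.Int.mod prev 10]) (some (-4)) none)
              (PySem.Int.mod (pvStep s) 10))
         else sequences) := rfl

theorem aLoop_eq (n : Nat) : ∀ (s : Int) (c : List (Int × Int))
    (sequences : PySem.Dict (List Int) Int),
    aLoop n s s (c.map Prod.fst) sequences = (pvLast n s, pvMid c (pvPairs n s) sequences) := by
  induction n with
  | zero => intro s c sequences; rfl
  | succ n ih =>
    intro s c sequences
    rw [aLoop_succ]
    have hmap : (c.map Prod.fst) ++ [PySem.Int.mod (pvStep s) 10 - PySem.Int.mod s 10]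
        = ((c ++ [(PySem.Int.mod (pvStep s) 10 - PySem.Int.mod s 10,
            PySem.Int.mod (pvStep s) 10)]).map Prod.fst) := by simp
    rw [hmap, ih (pvStep s) (c ++ [_])]
    simp only [pvPairs, pvMid, pvLast, List.length_map]

theorem calculateSecretNumber_spec : Claim_equal_calculateSecretNumber := by
  unfold Claim_equal_calculateSecretNumber Spec_calculateSecretNumber
  intro s N _
  show calculateSecretNumber s N = calculateSecretNumber_alt s N
  have hA := aLoop_eq N.toNat s [] PySem.Dict.empty
  simp only [List.map_nil] at hA
  have hmid := mid_eq_windows (pvPairs N.toNat s) [] PySem.Dict.empty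
  simp only [List.length_nil, List.drop_nil, List.nil_append] at hmid
  have hp := pairs_eq N.toNat s
  have s1 : ∀ (l : List Int), PySem.List.slice l (some 1) none = l.drop 1 := fun l => by
    rw [PySem.List.slice_from l (show (0:Int) ≤ 1 by norm_num)]; rfl
  have s2 : ∀ (l : List Int), PySem.List.slice l (some 2) none = l.drop 2 := fun l => by
    rw [PySem.List.slice_from l (show (0:Int) ≤ 2 by norm_num)]; rfl
  have s3 : ∀ (l : List (Int × Int)), PySem.List.slice l (some 3) none = l.drop 3 := fun l => by
    rw [PySem.List.slice_from l (show (0:Int) ≤ 3 by norm_num)]; rfl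
  simp only [calculateSecretNumber, calculateSecretNumber_alt, hA, hmid, pbGen_eq, s1, s2, s3]
  -- identify B's zipped quads with pvWindows of the pair stream
  have hfst : (List.zip (List.zipWith (fun (a b : Int) => b - a)
        ((s :: pvChain N.toNat s).map (fun x => PySem.Int.mod x 10))
        (((s :: pvChain N.toNat s).map (fun x => PySem.Int.mod x 10)).drop 1))
      (((s :: pvChain N.toNat s).map (fun x => PySem.Int.mod x 10)).drop 1)).map Prod.fst
      = List.zipWith (fun (a b : Int) => b - a)
        ((s :: pvChain N.toNat s).map (fun x => PySem.Int.mod x 10))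
        (((s :: pvChain N.toNat s).map (fun x => PySem.Int.mod x 10)).drop 1) := by
    apply List.map_fst_zip
    simp [List.length_zipWith]
  have hq := windows_eq_zip (List.zip (List.zipWith (fun (a b : Int) => b - a)
        ((s :: pvChain N.toNat s).map (fun x => PySem.Int.mod x 10))
        (((s :: pvChain N.toNat s).map (fun x => PySem.Int.mod x 10)).drop 1))
      (((s :: pvChain N.toNat s).map (fun x => PySem.Int.mod x 10)).drop 1))
  rw [hfst] at hq
  rw [hq, hp]
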